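-- pv_equiv track=rewrite | github.com/MichielRobeyn/AoC2023 | day11-15/day12a_hotsprings.py | check_sequential
-- ===== SOURCE A (Python) =====
-- def check_sequential(lst, target):
--     num = 0
--     i = 0
--     for el in lst:
--         if el == '#':
--             num += 1
--         else:
--             if num != 0:
--                 if num == target[i]:
--                     num = 0
--                     i += 1
--                 else:
--                     return 0
--     if num != 0:
--         if num != target[i]:
--             return 0
--     return 1
-- ===== SOURCE B (Python) =====
-- def check_sequential(lst, target):
--     # Phase 1: scan out the run-lengths of consecutive '#' elements.
--     groups = []
--     pos = 0
--     n = len(lst)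
--     while pos < n:
--         if lst[pos] != '#':
--             pos += 1
--             continue
--         start = pos
--         while pos < n and lst[pos] == '#':
--             pos += 1
--         groups.append(pos - start)
--     # Phase 2: compare each run against target by direct indexing.
--     for idx, g in enumerate(groups):
--         if g != target[idx]:
--             return 0
--     return 1
-- ===== Notes on version B (the rewrite author's own statement) =====
-- stated objective: alternative
-- what changed: A is a fused single-pass counter automaton carrying (num, i) state; B first extracts the list of '#'-run lengths with an inner run-scan, then compares that list against target by index in a separate loop.
import Mathlib
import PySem

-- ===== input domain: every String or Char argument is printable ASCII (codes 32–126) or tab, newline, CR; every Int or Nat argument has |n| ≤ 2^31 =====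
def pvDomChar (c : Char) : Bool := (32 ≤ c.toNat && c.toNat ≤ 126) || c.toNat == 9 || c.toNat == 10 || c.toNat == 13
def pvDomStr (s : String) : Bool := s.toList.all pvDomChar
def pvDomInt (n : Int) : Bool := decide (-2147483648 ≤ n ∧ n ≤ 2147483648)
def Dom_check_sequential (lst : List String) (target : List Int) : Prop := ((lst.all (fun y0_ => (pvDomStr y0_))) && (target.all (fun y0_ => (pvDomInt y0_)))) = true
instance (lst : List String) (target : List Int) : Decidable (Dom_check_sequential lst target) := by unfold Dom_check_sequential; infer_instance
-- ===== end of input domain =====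

-- B replaces A's fused counter automaton by two phases (extract the '#'-run lengths, then
-- compare them against target by index); objective: alternative, same O(n) cost.

-- ===== PORT A =====
-- A's loop: state (num, i); target[i] is PySem.List.pyGet? (none = IndexError, excluded by Pre_;
-- the .getD 0 default is only reached outside Pre_).
def csAgo (target : List Int) : List String → Int → Int → Int
  | [], num, i =>
      if num ≠ 0 then
        if num ≠ (PySem.List.pyGet? target i).getD 0 then 0 else 1
      else 1
  | el :: rest, num, i =>
      if el == "#" then csAgo target rest (num + 1) i
      else
        if num ≠ 0 then
          if num = (PySem.List.pyGet? target i).getD 0 then csAgo target rest 0 (i + 1)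
          else 0
        else csAgo target rest num i

def check_sequential (lst : List String) (target : List Int) : Int :=
  csAgo target lst 0 0

-- ===== PORT B =====
-- B's phase 1 (the inner while-scan of a '#'-run) ported as takeWhile/dropWhile (exact).
def pvGroups : List String → List Int
  | [] => []
  | el :: rest =>
      if el == "#" then
        (((rest.takeWhile (· == "#")).length : Int) + 1) :: pvGroups (rest.dropWhile (· == "#"))
      else pvGroups rest
  termination_by l => l.length
  decreasing_by
  · simpa using Nat.lt_succ_of_le (List.length_dropWhile_le _ _)
  · simp

-- B's phase 2: the enumerate loop; target[idx] raises (none) outside Pre_.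
def csBgo (target : List Int) : List Int → Int → Int
  | [], _ => 1
  | g :: gs, idx =>
      match PySem.List.pyGet? target idx with
      | none => 0
      | some t => if g ≠ t then 0 else csBgo target gs (idx + 1)

def check_sequential_alt (lst : List String) (target : List Int) : Int :=
  csBgo target (pvGroups lst) 0

-- ===== PRECONDITION & SPEC =====
-- Pre_ excludes exactly the inputs on which the Python raises IndexError: those whose list of
-- '#'-run lengths is longer than target while matching target as a prefix.
def preRuns (lst : List String) : List Int :=
  (lst.splitBy (fun a b => (a == "#") == (b == "#"))).filterMap
    (fun run => if run.head? == some "#" then some ((run.length : Int)) else none)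

def Pre_check_sequential (lst : List String) (target : List Int) : Prop :=
  ¬ (target.length < (preRuns lst).length ∧ (preRuns lst).take target.length = target)

instance (lst : List String) (target : List Int) : Decidable (Pre_check_sequential lst target) := by
  unfold Pre_check_sequential; infer_instance

def pvWitness_check_sequential : List String × List Int := (["#", ".", "#", "#"], [1, 2])

def Spec_check_sequential (lst : List String) (target : List Int) (out : Int) : Prop := out = check_sequential_alt lst target
instance (lst : List String) (target : List Int) (out : Int) : Decidable (Spec_check_sequential lst target out) := by unfold Spec_check_sequential; infer_instance

-- ===== CLAIM (what is proved, stated in full; the proofs are below) =====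
def Claim_equal_check_sequential : Prop := ∀ (lst : List String) (target : List Int), Dom_check_sequential lst target → Pre_check_sequential lst target → Spec_check_sequential lst target (check_sequential lst target)

-- ===== LEMMAS AND PROOFS =====

-- Main invariant: A's automaton run from state (num, i) equals B's check of the remaining runs.
-- Statement 1: clean state (num = 0); Statement 2: mid-run with count num > 0.
theorem csA_eq_csB (target : List Int) (lst : List String) :
    (∀ i : Int, csAgo target lst 0 i = csBgo target (pvGroups lst) i) ∧
    (∀ (num i : Int), 0 < num →
      csAgo target lst num i =
        csBgo target ((num + ((lst.takeWhile (· == "#")).length : Int)) ::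
          pvGroups (lst.dropWhile (· == "#"))) i) := by
  induction lst with
  | nil =>
      constructor
      · intro i; simp [csAgo, pvGroups, csBgo]
      · intro num i hnum
        have hnum' : num ≠ 0 := ne_of_gt hnum
        simp only [csAgo, pvGroups, csBgo, List.takeWhile_nil, List.dropWhile_nil,
          List.length_nil, Int.natCast_zero, add_zero]
        cases h : PySem.List.pyGet? target i with
        | none => simp [hnum']
        | some t => by_cases ht : num = t <;> simp [hnum', ht]
  | cons el rest ih =>
      obtain ⟨ih1, ih2⟩ := ih
      constructor
      · intro i
        by_cases hel : (el == "#") = true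
        · have h2 := ih2 1 i (by norm_num)
          simp only [csAgo, hel, if_true, zero_add] at h2 ⊢
          rw [h2]
          simp [pvGroups, hel, add_comm]
        · simp [csAgo, pvGroups, hel, ih1 i]
      · intro num i hnum
        have hnum' : num ≠ 0 := ne_of_gt hnum
        by_cases hel : (el == "#") = true
        · have h2 := ih2 (num + 1) i (by omega)
          simp only [csAgo, hel, if_true] at h2 ⊢
          rw [h2]
          simp only [List.takeWhile_cons, List.dropWhile_cons, hel, if_true,
            List.length_cons]
          push_cast
          ring_nf
        · simp only [csAgo, hel, if_false, hnum',
            List.takeWhile_cons, List.dropWhile_cons, ite_not]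
          cases h : PySem.List.pyGet? target i with
          | none => simp [csBgo, h, hnum']
          | some t =>
              by_cases ht : num = t
              · simp [csBgo, h, ht, pvGroups, hel, ih1 (i + 1)]
              · simp [csBgo, h, fun hh => ht hh]

theorem check_sequential_spec : Claim_equal_check_sequential := by
  intro lst target _ _
  unfold Spec_check_sequential check_sequential check_sequential_alt
  exact (csA_eq_csB target lst).1 0
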